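-- pv_equiv track=rewrite | github.com/tngtied/bojHub | 프로그래머스/1/1845. 폰켓몬/폰켓몬.py | solution
-- ===== SOURCE A (Python) =====
-- def solution(nums):
--     hashmap = {}
--     answer =0
--     for i in range(len(nums)):
--         if (nums[i] not in hashmap):
--             hashmap[nums[i]] = True
--             answer += 1
--     return min(answer, len(nums)//2)
-- ===== SOURCE B (Python) =====
-- def solution(nums):
--     count = 0
--     prev = None
--     for x in sorted(nums):
--         if prev is None or x != prev:
--             count += 1
--         prev = x
--     return min(count, len(nums) // 2)
-- ===== Notes on version B (the rewrite author's own statement) =====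
-- stated objective: alternative
-- what changed: Replaces A's hash-map membership loop over indices with a sort-then-scan: B sorts a copy of nums and counts an element exactly when it differs from the previous one, then applies the same min with len(nums)//2 cap.
import Mathlib
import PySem

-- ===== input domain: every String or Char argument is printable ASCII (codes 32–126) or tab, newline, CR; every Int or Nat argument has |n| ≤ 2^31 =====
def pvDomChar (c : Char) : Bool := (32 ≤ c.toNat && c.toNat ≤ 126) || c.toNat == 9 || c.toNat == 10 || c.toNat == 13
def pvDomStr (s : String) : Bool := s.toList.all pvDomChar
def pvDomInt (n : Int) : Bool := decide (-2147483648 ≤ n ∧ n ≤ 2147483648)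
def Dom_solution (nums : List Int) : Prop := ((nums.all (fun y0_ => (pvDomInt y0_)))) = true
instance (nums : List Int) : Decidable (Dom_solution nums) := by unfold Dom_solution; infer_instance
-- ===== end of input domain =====

-- B replaces A's hash-map membership loop with a sort-then-adjacent-comparison scan (alternative decomposition, same cap min(count, n//2)).

-- ===== PORT A =====
-- for i in range(len(nums)): if nums[i] not in hashmap: hashmap[nums[i]] = True; answer += 1
def solution (nums : List Int) : Int :=
  min
    (((PySem.List.pyRange 0 (PySem.List.len nums)).foldl
      (fun (s : PySem.Dict Int Bool × Int) i =>
        let x := PySem.List.pyGetD nums i 0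
        if !s.1.contains x then (s.1.insert x true, s.2 + 1) else s)
      (PySem.Dict.empty, 0)).2)
    (PySem.Int.floordiv (PySem.List.len nums) 2)

-- ===== PORT B =====
-- for x in sorted(nums): if prev is None or x != prev: count += 1; prev = x
def solution_alt (nums : List Int) : Int :=
  min
    (((PySem.List.sorted nums (fun x => x) false).foldl
      (fun (s : Int × Option Int) x =>
        (if s.2 = none ∨ some x ≠ s.2 then s.1 + 1 else s.1, some x))
      (0, none)).1)
    (PySem.Int.floordiv (PySem.List.len nums) 2)

-- ===== PRECONDITION & SPEC =====
def Spec_solution (nums : List Int) (out : Int) : Prop := out = solution_alt nums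
instance (nums : List Int) (out : Int) : Decidable (Spec_solution nums out) := by unfold Spec_solution; infer_instance

-- ===== CLAIM (what is proved, stated in full; the proofs are below) =====
def Claim_equal_solution : Prop := ∀ (nums : List Int), Dom_solution nums → Spec_solution nums (solution nums)

-- ===== LEMMAS AND PROOFS =====

lemma card_insert_eq_card_erase_add_one (s : Finset Int) (a : Int) :
    (insert a s).card = (s.erase a).card + 1 := by
  by_cases h : a ∈ s
  · rw [Finset.insert_eq_self.mpr h, ← Finset.card_erase_add_one h]
  · rw [Finset.card_insert_of_notMem h, Finset.erase_eq_of_notMem h]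

-- A's loop counts exactly the elements not yet in the dict's key set.
lemma aLoop (l : List Int) (d : PySem.Dict Int Bool) (c : Int) (hnd : d.keys.Nodup) :
    (l.foldl (fun (s : PySem.Dict Int Bool × Int) x =>
        if !s.1.contains x then (s.1.insert x true, s.2 + 1) else s) (d, c)).2
      = c + ((l.toFinset \ d.keys.toFinset).card : Int) := by
  induction l generalizing d c with
  | nil => simp
  | cons x t ih =>
    by_cases h : d.contains x = true
    · have hx : x ∈ d.keys.toFinset := List.mem_toFinset.mpr ((PySem.Dict.contains_iff_mem_keys d x).mp h)
      simp only [List.foldl_cons, h, Bool.not_true, Bool.false_eq_true, if_false]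
      rw [ih d c hnd, List.toFinset_cons, Finset.insert_sdiff_of_mem _ hx]
    · have h' : d.contains x = false := by simpa using h
      have hx : x ∉ d.keys.toFinset := by
        simp only [List.mem_toFinset]
        intro hm
        exact absurd ((PySem.Dict.contains_iff_mem_keys d x).mpr hm) (by simp [h'])
      simp only [List.foldl_cons, h', Bool.not_false, if_true]
      rw [ih (d.insert x true) (c + 1) (PySem.Dict.nodup_keys_insert d x true hnd)]
      rw [PySem.Dict.keys_insert_of_not_contains d true h']
      have hk : (d.keys ++ [x]).toFinset = insert x d.keys.toFinset := by
        simp [List.toFinset_append, Finset.union_singleton]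
      rw [hk, List.toFinset_cons, Finset.insert_sdiff_of_notMem _ hx, Finset.sdiff_insert,
        card_insert_eq_card_erase_add_one]
      push_cast
      ring

-- B's scan over a sorted tail with previous element p counts the distinct elements other than p.
lemma bLoop (l : List Int) (c : Int) (p : Int) (hp : ∀ x ∈ l, p ≤ x) (hs : l.Pairwise (· ≤ ·)) :
    (l.foldl (fun (s : Int × Option Int) x =>
        (if s.2 = none ∨ some x ≠ s.2 then s.1 + 1 else s.1, some x)) (c, some p)).1
      = c + ((l.toFinset.erase p).card : Int) := by
  induction l generalizing c p with
  | nil => simp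
  | cons x t ih =>
    have hpt : ∀ y ∈ t, p ≤ y := fun y hy => hp y (List.mem_cons_of_mem x hy)
    have hxt : ∀ y ∈ t, x ≤ y := (List.pairwise_cons.mp hs).1
    have hst : t.Pairwise (· ≤ ·) := (List.pairwise_cons.mp hs).2
    by_cases hxp : x = p
    · subst hxp
      have h0 : (if (some x : Option Int) = none ∨ some x ≠ some x then c + 1 else c) = c := by
        simp
      simp only [List.foldl_cons, h0]
      rw [ih c x hxt hst, List.toFinset_cons, Finset.erase_insert_eq_erase]
    · have hcond : ((some p : Option Int) = none ∨ some x ≠ some p) := Or.inr (by simpa using hxp)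
      simp only [List.foldl_cons, if_pos hcond]
      rw [ih (c + 1) x hxt hst]
      have hpx : p < x := lt_of_le_of_ne (hp x (List.mem_cons_self)) (fun h => hxp h.symm)
      have hpn : p ∉ (x :: t).toFinset := by
        simp only [List.toFinset_cons, Finset.mem_insert, List.mem_toFinset]
        rintro (h | h)
        · exact absurd h.symm hxp
        · exact absurd (hxt p h) (by omega)
      rw [List.toFinset_cons,
        Finset.erase_eq_of_notMem (s := insert x t.toFinset) (a := p)
          (by simpa [List.toFinset_cons] using hpn),
        card_insert_eq_card_erase_add_one t.toFinset x]
      push_cast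
      ring

-- B's whole scan counts the distinct elements of the sorted list.
lemma bCount (l : List Int) (hs : l.Pairwise (· ≤ ·)) :
    (l.foldl (fun (s : Int × Option Int) x =>
        (if s.2 = none ∨ some x ≠ s.2 then s.1 + 1 else s.1, some x)) (0, none)).1
      = (l.toFinset.card : Int) := by
  cases l with
  | nil => simp
  | cons x t =>
    have h1 : ((x :: t).foldl (fun (s : Int × Option Int) x =>
        (if s.2 = none ∨ some x ≠ s.2 then s.1 + 1 else s.1, some x)) (0, none))
        = t.foldl (fun (s : Int × Option Int) x =>
        (if s.2 = none ∨ some x ≠ s.2 then s.1 + 1 else s.1, some x)) (1, some x) := by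
      simp
    rw [h1, bLoop t 1 x (List.pairwise_cons.mp hs).1 (List.pairwise_cons.mp hs).2,
      List.toFinset_cons, card_insert_eq_card_erase_add_one]
    push_cast
    ring

lemma sortedToFinset (nums : List Int) :
    (PySem.List.sorted nums (fun x => x) false).toFinset = nums.toFinset :=
  Finset.ext fun a => by
    simp only [List.mem_toFinset, (PySem.List.sorted_perm nums (fun x => x) false).mem_iff]

-- ===== VERDICT (by name: the statement is the Claim_ definition above) =====
theorem solution_spec : Claim_equal_solution := by
  intro nums _
  show solution nums = solution_alt nums
  unfold solution solution_alt
  rw [PySem.List.foldl_pyRange_zero_pyGetD nums 0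
      (fun (s : PySem.Dict Int Bool × Int) x =>
        if !s.1.contains x then (s.1.insert x true, s.2 + 1) else s) (PySem.Dict.empty, 0)]
  rw [aLoop nums PySem.Dict.empty 0 (by simp [PySem.Dict.keys_empty]),
    bCount _ (PySem.List.sorted_pairwise nums (fun x => x)),
    sortedToFinset nums]
  simp [PySem.Dict.keys_empty]
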